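-- pv_equiv track=rewrite | github.com/micheledusi/AlgorithmicDiscrimination_MasterThesis | src/parsers/winogender_parser.py | instantiate_gender
-- ===== SOURCE A (Python) =====
-- MALE_INDEX: int = 0
--
-- FEMALE_INDEX: int = 1
--
-- PRONOUNS_DICT: dict[str, tuple] = {
-- 	"$NOM_PRONOUN": ("he", "she", "they"),
-- 	"$POSS_PRONOUN": ("his", "her", "their"),
-- 	"$ACC_PRONOUN": ("him", "her", "them"),
-- }
--
-- def instantiate_gender(templates: list[str], genders: list[int] = [MALE_INDEX, FEMALE_INDEX]) -> list[list[str]]: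
-- 	"""
-- 	From a list of string templates containing "pronoun holes", returns a list where
-- 	every hole is filled with the appropriate pronoun, declined in all the desired genders.
-- 	The templates have:
-- 	- "$NOM_PRONOUN" for the nominative pronouns: ("he", "she", "they"),
-- 	- "$POSS_PRONOUN" for the possessive pronouns: ("his", "her", "their"),
-- 	- "$ACC_PRONOUN" for the accusative pronouns: ("him", "her", "them"),
-- 	:param templates: The list of templates with one pronoun mask in each.
-- 		If more pronoun masks appear in the same string template, the function still works but declines all the pronouns
-- 		with the same gender. It's not possible to obtain all the crossed combinations.
-- 	:param genders: The list of desired genders to use in the instantiation.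
-- 	:return: The list of list of instatiated sentences. Each template produces a list of sentences, each one instantiated
-- 		with a gender.
-- 	"""
-- 	sentences: list[list[str]] = []
-- 	for tmpl in templates:
-- 	# Replacing pronouns
-- 		genders_tuple = []
--
-- 		# For every desired gender
-- 		for gend_ix in genders:
-- 			gend_sentence = tmpl
--
-- 			# For every pronoun type (Nominative, Possessive, Accusative):
-- 			for pron_type, pronouns_tuple in PRONOUNS_DICT.items():
-- 				# pron_type is a string, e.g. "$NOM_PRONOUN"
-- 				# pronouns_tuple is a tuple of corresponding english pronouns, e.g. ("he", "she", "they")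
--
-- 				gend_sentence = gend_sentence.replace(pron_type, pronouns_tuple[gend_ix])
-- 			genders_tuple.append(gend_sentence)
-- 		sentences.append(genders_tuple)
-- 	return sentences
-- ===== SOURCE B (Python) =====
-- # B: parse each template ONCE into literal segments + pronoun holes, then instantiate
-- # each gender by joining segments with the looked-up pronouns (A re-scans the whole
-- # string three times per gender with str.replace).
--
-- MALE_INDEX: int = 0
-- FEMALE_INDEX: int = 1
--
-- PRONOUNS_DICT: dict[str, tuple] = {
-- 	"$NOM_PRONOUN": ("he", "she", "they"),
-- 	"$POSS_PRONOUN": ("his", "her", "their"),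
-- 	"$ACC_PRONOUN": ("him", "her", "them"),
-- }
--
-- def _parse(tmpl):
-- 	"""Split tmpl into (parts, holes): len(parts) == len(holes) + 1 and
-- 	tmpl == parts[0] + tok(holes[0]) + parts[1] + ..."""
-- 	parts, holes, cur = [], [], []
-- 	i, n = 0, len(tmpl)
-- 	while i < n:
-- 		hit = None
-- 		for tok, tup in PRONOUNS_DICT.items():
-- 			if tmpl.startswith(tok, i):
-- 				hit = (tok, tup)
-- 				break
-- 		if hit is not None:
-- 			parts.append(''.join(cur))
-- 			cur = []
-- 			holes.append(hit[1])
-- 			i += len(hit[0])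
-- 		else:
-- 			cur.append(tmpl[i])
-- 			i += 1
-- 	parts.append(''.join(cur))
-- 	return parts, holes
--
-- def _pieces(parts, holes, g):
-- 	pieces = [parts[0]]
-- 	for tup, seg in zip(holes, parts[1:]):
-- 		pieces.append(tup[g])
-- 		pieces.append(seg)
-- 	return pieces
--
-- def instantiate_gender(templates: list[str], genders: list[int] = [MALE_INDEX, FEMALE_INDEX]) -> list[list[str]]:
-- 	result = []
-- 	for tmpl in templates:
-- 		parts, holes = _parse(tmpl)
-- 		result.append([''.join(_pieces(parts, holes, g)) for g in genders])
-- 	return result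
-- ===== Notes on version B (the rewrite author's own statement) =====
-- stated objective: alternative
-- what changed: B parses each template once into literal segments plus pronoun holes in a single left-to-right scan and then instantiates every gender by joining the segments with looked-up pronouns, instead of A's three sequential full-string str.replace passes per template per gender.
import Mathlib
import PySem

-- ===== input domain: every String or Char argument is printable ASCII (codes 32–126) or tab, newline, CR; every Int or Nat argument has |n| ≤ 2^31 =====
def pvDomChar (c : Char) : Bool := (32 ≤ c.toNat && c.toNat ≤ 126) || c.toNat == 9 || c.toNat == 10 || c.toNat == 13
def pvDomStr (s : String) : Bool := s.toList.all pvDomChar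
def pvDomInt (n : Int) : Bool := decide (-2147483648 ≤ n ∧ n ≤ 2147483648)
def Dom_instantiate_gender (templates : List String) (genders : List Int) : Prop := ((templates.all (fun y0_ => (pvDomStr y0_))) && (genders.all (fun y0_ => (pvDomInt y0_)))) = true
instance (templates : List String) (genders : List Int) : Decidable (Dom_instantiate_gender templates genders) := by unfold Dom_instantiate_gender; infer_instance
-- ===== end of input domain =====

-- B parses each template once into literal segments plus pronoun holes and joins them per
-- gender, instead of A's three full-string replace passes per gender (objective: alternative).

-- ===== PORT A =====
-- PRONOUNS_DICT, iterated in insertion order (tuples become lists of the three pronouns)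
def pvPronounsDict : List (String × List String) :=
  [("$NOM_PRONOUN", ["he", "she", "they"]),
   ("$POSS_PRONOUN", ["his", "her", "their"]),
   ("$ACC_PRONOUN", ["him", "her", "them"])]

-- pронouns_tuple[gend_ix]: Python raises IndexError out of range; Pre_ keeps the index in range,
-- so the `.getD ""` default is never reached on admitted inputs.
def instantiate_gender (templates : List String) (genders : List Int) : List (List String) :=
  templates.foldl (fun sentences tmpl =>
    sentences ++ [genders.foldl (fun genders_tuple gend_ix =>
      genders_tuple ++ [pvPronounsDict.foldl (fun gend_sentence pr =>
        PySem.Str.replace gend_sentence pr.1 ((PySem.List.pyGet? pr.2 gend_ix).getD "")) tmpl]) []]) []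

-- ===== PORT B =====
-- _parse: one left-to-right scan; cur is the pending literal segment (kept reversed)
def pvParseGo : List Char → List Char → List (List Char) × List (List String)
  | [], cur => ([cur.reverse], [])
  | c :: t, cur =>
    match pvPronounsDict.find? (fun pr => pr.1.toList.isPrefixOf (c :: t)) with
    | some pr =>
      let r := pvParseGo (t.drop (pr.1.toList.length - 1)) []
      (cur.reverse :: r.1, pr.2 :: r.2)
    | none => pvParseGo t (c :: cur)
  termination_by s _ => s.length
  decreasing_by
    · simp only [List.length_drop, List.length_cons]; omega
    · simp

-- _pieces + ''.join, on char lists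
def pvRender (parts : List (List Char)) (holes : List (List String)) (g : Int) : List Char :=
  parts.headD [] ++ (holes.zip parts.tail).flatMap
    (fun ph => ((PySem.List.pyGet? ph.1 g).getD "").toList ++ ph.2)

def instantiate_gender_alt (templates : List String) (genders : List Int) : List (List String) :=
  templates.map (fun tmpl =>
    let r := pvParseGo tmpl.toList []
    genders.map (fun g => String.ofList (pvRender r.1 r.2 g)))

-- ===== PRECONDITION & SPEC =====
-- Pre_ excludes exactly the inputs where A raises IndexError: a gender index outside -3..2
-- while templates is nonempty (with templates = [] A never indexes the pronoun tuples).
def Pre_instantiate_gender (templates : List String) (genders : List Int) : Prop :=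
  templates = [] ∨ ∀ g ∈ genders, -3 ≤ g ∧ g < 3
instance (templates : List String) (genders : List Int) : Decidable (Pre_instantiate_gender templates genders) := by unfold Pre_instantiate_gender; infer_instance

def pvWitness_instantiate_gender : List String × List Int :=
  (["$NOM_PRONOUN said $POSS_PRONOUN cat likes $ACC_PRONOUN."], [0, 1])

def Spec_instantiate_gender (templates : List String) (genders : List Int) (out : List (List String)) : Prop := out = instantiate_gender_alt templates genders
instance (templates : List String) (genders : List Int) (out : List (List String)) : Decidable (Spec_instantiate_gender templates genders out) := by unfold Spec_instantiate_gender; infer_instance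

-- ===== CLAIM (what is proved, stated in full; the proofs are below) =====
def Claim_equal_instantiate_gender : Prop := ∀ (templates : List String) (genders : List Int), Dom_instantiate_gender templates genders → Pre_instantiate_gender templates genders → Spec_instantiate_gender templates genders (instantiate_gender templates genders)


-- ===== LEMMAS AND PROOFS =====

-- the three tokens as char lists
def pvTok1 : List Char := ['$','N','O','M','_','P','R','O','N','O','U','N']
def pvTok2 : List Char := ['$','P','O','S','S','_','P','R','O','N','O','U','N']
def pvTok3 : List Char := ['$','A','C','C','_','P','R','O','N','O','U','N']

-- natural structural form of one str.replace pass (old nonempty)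
def pvRepl (old new : List Char) : List Char → List Char
  | [] => []
  | c :: t =>
    if old.isPrefixOf (c :: t) then new ++ pvRepl old new (t.drop (old.length - 1))
    else c :: pvRepl old new t
  termination_by s => s.length
  decreasing_by
    · simp only [List.length_drop, List.length_cons]; omega
    · simp

-- single pass substituting all three tokens at once
def pvSubst (p1 p2 p3 : List Char) : List Char → List Char
  | [] => []
  | c :: t =>
    if pvTok1.isPrefixOf (c :: t) then p1 ++ pvSubst p1 p2 p3 (t.drop 11)
    else if pvTok2.isPrefixOf (c :: t) then p2 ++ pvSubst p1 p2 p3 (t.drop 12)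
    else if pvTok3.isPrefixOf (c :: t) then p3 ++ pvSubst p1 p2 p3 (t.drop 11)
    else c :: pvSubst p1 p2 p3 t
  termination_by s => s.length
  decreasing_by
    · simp only [List.length_drop, List.length_cons]; omega
    · simp only [List.length_drop, List.length_cons]; omega
    · simp only [List.length_drop, List.length_cons]; omega
    · simp

theorem pvReplaceGo_eq (old new : List Char) (hold : old ≠ []) :
    ∀ fuel l acc, l.length ≤ fuel →
      PySem.Chars.replace.go old new fuel l acc = acc.reverse ++ pvRepl old new l := by
  intro fuel
  induction fuel with
  | zero =>
    intro l acc hl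
    have : l = [] := by cases l <;> simp_all
    subst this
    simp [PySem.Chars.replace.go, pvRepl]
  | succ n ih =>
    intro l acc hl
    cases l with
    | nil => simp [PySem.Chars.replace.go, pvRepl]
    | cons c t =>
      have hpos : 0 < old.length := List.length_pos_iff.mpr hold
      rw [PySem.Chars.replace.go]
      by_cases hpre : old.isPrefixOf (c :: t)
      · simp only [hpre, if_true]
        rw [ih]
        · have hd : List.drop old.length (c :: t) = t.drop (old.length - 1) := by
            cases old with
            | nil => exact absurd rfl hold
            | cons o os => simp
          rw [hd, pvRepl]
          simp [hpre]
        · simp only [List.length_drop, List.length_cons] at *; omega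
      · simp only [hpre]
        rw [ih t (c :: acc) (by simp at hl; omega)]
        rw [pvRepl]
        simp [hpre]

theorem pvReplace_eq (old new s : List Char) (hold : old ≠ []) :
    PySem.Chars.replace s old new = pvRepl old new s := by
  rw [PySem.Chars.replace]
  simp [List.isEmpty_iff, hold, pvReplaceGo_eq old new hold s.length s [] le_rfl]

-- a '$'-free literal passes through a replace pass untouched
theorem pvRepl_skip (tk p : List Char) :
    ∀ u v, '$' ∉ u → pvRepl ('$' :: tk) p (u ++ v) = u ++ pvRepl ('$' :: tk) p v := by
  intro u
  induction u with
  | nil => simp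
  | cons c u' ih =>
    intro v hu
    have hc : c ≠ '$' := by intro h; exact hu (by simp [h])
    rw [List.cons_append, pvRepl]
    have hnp : ¬ (('$' :: tk).isPrefixOf (c :: (u' ++ v)) = true) := by
      simp [List.isPrefixOf]
      intro h; exact absurd h.symm hc
    rw [ih v (fun h => hu (by simp [h]))]
    simp [hnp]

-- pronoun condition: nonempty, all lowercase letters
def pvIsPron (p : List Char) : Prop := p ≠ [] ∧ ∀ c ∈ p, c.isLower = true

theorem pvPron_no_dollar {p : List Char} (hp : pvIsPron p) : '$' ∉ p :=
  fun h => absurd (hp.2 _ h) (by decide)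

-- an all-UPPER/'_' word is a prefix of the output of a replace pass iff it was one of the input
theorem pvRepl_prefix_inv (tk p : List Char) (hp : pvIsPron p) :
    ∀ x (w : List Char), (∀ c ∈ w, c.isUpper = true ∨ c = '_') →
      (w.isPrefixOf (pvRepl ('$' :: tk) p x) ↔ w.isPrefixOf x) := by
  intro x
  induction x using pvRepl.induct (old := '$' :: tk) with
  | case1 =>
    intro w hw; rw [pvRepl]
  | case2 c t hpre ih =>
    intro w hw
    rw [pvRepl, if_pos hpre]
    cases w with
    | nil => simp
    | cons a w' =>
      have ha : a.isUpper = true ∨ a = '_' := hw a (by simp)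
      have hc : '$' = c ∧ tk.isPrefixOf t = true := by
        simpa [List.isPrefixOf] using hpre
      constructor
      · intro h
        exfalso
        obtain ⟨d, p', hpd⟩ : ∃ d p', p = d :: p' := by
          cases p with
          | nil => exact absurd rfl hp.1
          | cons d p' => exact ⟨d, p', rfl⟩
        have hd : d.isLower = true := hp.2 d (by simp [hpd])
        rw [hpd] at h
        simp only [List.cons_append, List.isPrefixOf, Bool.and_eq_true, beq_iff_eq] at h
        rcases h with ⟨had, -⟩
        subst had
        rcases ha with h1 | h1
        · exact Char.not_isLower_of_isUpper h1 hd
        · subst h1; exact absurd hd (by decide)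
      · intro h
        exfalso
        simp only [List.isPrefixOf, Bool.and_eq_true, beq_iff_eq] at h
        rcases h with ⟨hac, -⟩
        subst hac
        rcases hc with ⟨hc1, -⟩
        subst hc1
        rcases ha with h1 | h1
        · exact absurd h1 (by decide)
        · simp at h1
  | case3 c t hpre ih =>
    intro w hw
    rw [pvRepl, if_neg hpre]
    cases w with
    | nil => simp
    | cons a w' =>
      simp only [List.isPrefixOf, Bool.and_eq_true, beq_iff_eq]
      constructor
      · rintro ⟨hh1, hh2⟩
        exact ⟨hh1, (ih w' (fun d hd => hw d (by simp [hd]))).mp hh2⟩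
      · rintro ⟨hh1, hh2⟩
        exact ⟨hh1, (ih w' (fun d hd => hw d (by simp [hd]))).mpr hh2⟩

-- skip lemma restated for a token given by an equation (the tokens are named constants)
theorem pvRepl_skip' (tok tk p : List Char) (htok : tok = '$' :: tk) (u v : List Char)
    (hu : '$' ∉ u) : pvRepl tok p (u ++ v) = u ++ pvRepl tok p v := by
  subst htok; exact pvRepl_skip tk p u v hu

-- the token tails consist of uppercase letters and '_' (Bool evaluation; decide recurses too deep)
theorem pvTokTail_upper (tk : List Char) (h : (tk.all (fun c => c.isUpper || c == '_')) = true) :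
    ∀ c ∈ tk, c.isUpper = true ∨ c = '_' := by simpa using h

theorem pvRepl_prefix_inv' (tok tk p : List Char) (htok : tok = '$' :: tk) (hp : pvIsPron p)
    (x w : List Char) (hw : ∀ c ∈ w, c.isUpper = true ∨ c = '_') :
    (w.isPrefixOf (pvRepl tok p x) ↔ w.isPrefixOf x) := by
  subst htok; exact pvRepl_prefix_inv tk p hp x w hw

-- a replace pass fires on its own token at the head
theorem pvRepl_fire (tok p u : List Char) (htok : tok ≠ []) :
    pvRepl tok p (tok ++ u) = p ++ pvRepl tok p u := by
  cases tok with
  | nil => exact absurd rfl htok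
  | cons a tk =>
    rw [List.cons_append, pvRepl]
    have hc1 : (a :: tk).isPrefixOf (a :: (tk ++ u)) = true :=
      List.isPrefixOf_iff_prefix.mpr (List.prefix_append (a :: tk) u)
    have hc2 : List.drop ((a :: tk).length - 1) (tk ++ u) = u := by
      simp
    rw [if_pos hc1, hc2]

-- one replacing pass walks over a DIFFERENT token unchanged (tokens only overlap at '$')
theorem pvRepl_m12 (p u : List Char) :
    pvRepl pvTok1 p (pvTok2 ++ u) = pvTok2 ++ pvRepl pvTok1 p u := by
  rw [show pvTok2 ++ u = '$' :: (pvTok2.tail ++ u) from rfl, pvRepl]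
  have hno : ¬ (pvTok1.isPrefixOf ('$' :: (pvTok2.tail ++ u)) = true) := by
    simp [pvTok1, pvTok2, List.isPrefixOf]
  rw [if_neg hno, pvRepl_skip' pvTok1 pvTok1.tail p rfl pvTok2.tail u (by decide)]
  rfl

theorem pvRepl_m13 (p u : List Char) :
    pvRepl pvTok1 p (pvTok3 ++ u) = pvTok3 ++ pvRepl pvTok1 p u := by
  rw [show pvTok3 ++ u = '$' :: (pvTok3.tail ++ u) from rfl, pvRepl]
  have hno : ¬ (pvTok1.isPrefixOf ('$' :: (pvTok3.tail ++ u)) = true) := by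
    simp [pvTok1, pvTok3, List.isPrefixOf]
  rw [if_neg hno, pvRepl_skip' pvTok1 pvTok1.tail p rfl pvTok3.tail u (by decide)]
  rfl

theorem pvRepl_m23 (p u : List Char) :
    pvRepl pvTok2 p (pvTok3 ++ u) = pvTok3 ++ pvRepl pvTok2 p u := by
  rw [show pvTok3 ++ u = '$' :: (pvTok3.tail ++ u) from rfl, pvRepl]
  have hno : ¬ (pvTok2.isPrefixOf ('$' :: (pvTok3.tail ++ u)) = true) := by
    simp [pvTok2, pvTok3, List.isPrefixOf]
  rw [if_neg hno, pvRepl_skip' pvTok2 pvTok2.tail p rfl pvTok3.tail u (by decide)]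
  rfl

-- the combined pass fires on each token at the head
theorem pvSubst_fire1 (p1 p2 p3 u : List Char) :
    pvSubst p1 p2 p3 (pvTok1 ++ u) = p1 ++ pvSubst p1 p2 p3 u := by
  rw [show pvTok1 ++ u = '$' :: (pvTok1.tail ++ u) from rfl, pvSubst]
  have hc1 : pvTok1.isPrefixOf ('$' :: (pvTok1.tail ++ u)) = true :=
    List.isPrefixOf_iff_prefix.mpr (List.prefix_append pvTok1 u)
  rw [if_pos hc1, show List.drop 11 (pvTok1.tail ++ u) = u from by
        have h := List.drop_left (l₁ := pvTok1.tail) (l₂ := u)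
        rwa [show pvTok1.tail.length = 11 from rfl] at h]

theorem pvSubst_fire2 (p1 p2 p3 u : List Char) :
    pvSubst p1 p2 p3 (pvTok2 ++ u) = p2 ++ pvSubst p1 p2 p3 u := by
  rw [show pvTok2 ++ u = '$' :: (pvTok2.tail ++ u) from rfl, pvSubst]
  have hno : ¬ (pvTok1.isPrefixOf ('$' :: (pvTok2.tail ++ u)) = true) := by
    simp [pvTok1, pvTok2, List.isPrefixOf]
  have hc1 : pvTok2.isPrefixOf ('$' :: (pvTok2.tail ++ u)) = true :=
    List.isPrefixOf_iff_prefix.mpr (List.prefix_append pvTok2 u)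
  rw [if_neg hno, if_pos hc1, show List.drop 12 (pvTok2.tail ++ u) = u from by
        have h := List.drop_left (l₁ := pvTok2.tail) (l₂ := u)
        rwa [show pvTok2.tail.length = 12 from rfl] at h]

theorem pvSubst_fire3 (p1 p2 p3 u : List Char) :
    pvSubst p1 p2 p3 (pvTok3 ++ u) = p3 ++ pvSubst p1 p2 p3 u := by
  rw [show pvTok3 ++ u = '$' :: (pvTok3.tail ++ u) from rfl, pvSubst]
  have hno1 : ¬ (pvTok1.isPrefixOf ('$' :: (pvTok3.tail ++ u)) = true) := by
    simp [pvTok1, pvTok3, List.isPrefixOf]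
  have hno2 : ¬ (pvTok2.isPrefixOf ('$' :: (pvTok3.tail ++ u)) = true) := by
    simp [pvTok2, pvTok3, List.isPrefixOf]
  have hc1 : pvTok3.isPrefixOf ('$' :: (pvTok3.tail ++ u)) = true :=
    List.isPrefixOf_iff_prefix.mpr (List.prefix_append pvTok3 u)
  rw [if_neg hno1, if_neg hno2, if_pos hc1, show List.drop 11 (pvTok3.tail ++ u) = u from by
        have h := List.drop_left (l₁ := pvTok3.tail) (l₂ := u)
        rwa [show pvTok3.tail.length = 11 from rfl] at h]

-- A's three replace passes equal the combined single pass
theorem pvComp (p1 p2 p3 : List Char) (h1 : pvIsPron p1) (h2 : pvIsPron p2) (_h3 : pvIsPron p3) :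
    ∀ s, pvRepl pvTok3 p3 (pvRepl pvTok2 p2 (pvRepl pvTok1 p1 s)) = pvSubst p1 p2 p3 s := by
  have main : ∀ n s, s.length ≤ n →
      pvRepl pvTok3 p3 (pvRepl pvTok2 p2 (pvRepl pvTok1 p1 s)) = pvSubst p1 p2 p3 s := by
    intro n
    induction n with
    | zero =>
      intro s hs
      have : s = [] := by cases s <;> simp_all
      subst this
      rw [pvSubst, pvRepl, pvRepl, pvRepl]
    | succ n ih =>
      intro s hs
      cases s with
      | nil => rw [pvSubst, pvRepl, pvRepl, pvRepl]
      | cons c t =>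
        by_cases hp1 : pvTok1.isPrefixOf (c :: t)
        · -- "$NOM_PRONOUN" at the head
          obtain ⟨u, hu⟩ : ∃ u, c :: t = pvTok1 ++ u :=
            (List.isPrefixOf_iff_prefix.mp hp1).elim (fun u hu => ⟨u, hu.symm⟩)
          have hlen : u.length ≤ n := by
            have := congrArg List.length hu
            simp [pvTok1] at this
            simp at hs
            omega
          rw [hu, pvRepl_fire pvTok1 p1 u (by decide),
              pvRepl_skip' pvTok2 pvTok2.tail p2 rfl p1 _ (pvPron_no_dollar h1),
              pvRepl_skip' pvTok3 pvTok3.tail p3 rfl p1 _ (pvPron_no_dollar h1),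
              pvSubst_fire1, ih u hlen]
        · by_cases hp2 : pvTok2.isPrefixOf (c :: t)
          · obtain ⟨u, hu⟩ : ∃ u, c :: t = pvTok2 ++ u :=
              (List.isPrefixOf_iff_prefix.mp hp2).elim (fun u hu => ⟨u, hu.symm⟩)
            have hlen : u.length ≤ n := by
              have := congrArg List.length hu
              simp [pvTok2] at this
              simp at hs
              omega
            rw [hu, pvRepl_m12, pvRepl_fire pvTok2 p2 _ (by decide),
                pvRepl_skip' pvTok3 pvTok3.tail p3 rfl p2 _ (pvPron_no_dollar h2),
                pvSubst_fire2, ih u hlen]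
          · by_cases hp3 : pvTok3.isPrefixOf (c :: t)
            · obtain ⟨u, hu⟩ : ∃ u, c :: t = pvTok3 ++ u :=
                (List.isPrefixOf_iff_prefix.mp hp3).elim (fun u hu => ⟨u, hu.symm⟩)
              have hlen : u.length ≤ n := by
                have := congrArg List.length hu
                simp [pvTok3] at this
                simp at hs
                omega
              rw [hu, pvRepl_m13, pvRepl_m23, pvRepl_fire pvTok3 p3 _ (by decide),
                  pvSubst_fire3, ih u hlen]
            · -- no token at the head: all passes step over c
              have hstep1 : pvRepl pvTok1 p1 (c :: t) = c :: pvRepl pvTok1 p1 t := by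
                rw [pvRepl, if_neg hp1]
              have hA : ¬ (pvTok2.isPrefixOf (c :: pvRepl pvTok1 p1 t) = true) := by
                rw [show pvTok2 = '$' :: pvTok2.tail from rfl]
                simp only [List.isPrefixOf, Bool.and_eq_true, beq_iff_eq]
                rintro ⟨hc, hrest⟩
                rw [pvRepl_prefix_inv' pvTok1 pvTok1.tail p1 rfl h1 t pvTok2.tail (pvTokTail_upper _ rfl)] at hrest
                apply hp2
                rw [show pvTok2 = '$' :: pvTok2.tail from rfl]
                simp only [List.isPrefixOf, Bool.and_eq_true, beq_iff_eq]
                exact ⟨hc, hrest⟩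
              have hstep2 : pvRepl pvTok2 p2 (c :: pvRepl pvTok1 p1 t) =
                  c :: pvRepl pvTok2 p2 (pvRepl pvTok1 p1 t) := by
                rw [pvRepl, if_neg hA]
              have hB : ¬ (pvTok3.isPrefixOf (c :: pvRepl pvTok2 p2 (pvRepl pvTok1 p1 t)) = true) := by
                rw [show pvTok3 = '$' :: pvTok3.tail from rfl]
                simp only [List.isPrefixOf, Bool.and_eq_true, beq_iff_eq]
                rintro ⟨hc, hrest⟩
                rw [pvRepl_prefix_inv' pvTok2 pvTok2.tail p2 rfl h2 _ pvTok3.tail (pvTokTail_upper _ rfl)] at hrest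
                rw [pvRepl_prefix_inv' pvTok1 pvTok1.tail p1 rfl h1 t pvTok3.tail (pvTokTail_upper _ rfl)] at hrest
                apply hp3
                rw [show pvTok3 = '$' :: pvTok3.tail from rfl]
                simp only [List.isPrefixOf, Bool.and_eq_true, beq_iff_eq]
                exact ⟨hc, hrest⟩
              have hstep3 : pvRepl pvTok3 p3 (c :: pvRepl pvTok2 p2 (pvRepl pvTok1 p1 t)) =
                  c :: pvRepl pvTok3 p3 (pvRepl pvTok2 p2 (pvRepl pvTok1 p1 t)) := by
                rw [pvRepl, if_neg hB]
              rw [hstep1, hstep2, hstep3, pvSubst, if_neg hp1, if_neg hp2, if_neg hp3,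
                  ih t (by simp at hs; omega)]
  intro s
  exact main s.length s le_rfl

-- the parser always produces at least one literal segment
theorem pvParseGo_shape (s cur : List Char) : ∃ q0 qs, (pvParseGo s cur).1 = q0 :: qs := by
  induction s, cur using pvParseGo.induct with
  | case1 cur => exact ⟨cur.reverse, [], by rw [pvParseGo]⟩
  | case2 c t cur pr hfind ih => rw [pvParseGo, hfind]; exact ⟨cur.reverse, _, rfl⟩
  | case3 c t cur hfind ih => rw [pvParseGo, hfind]; exact ih

-- rendering peels one hole and one following segment at a time
theorem pvRender_cons (x q0 : List Char) (qs : List (List Char)) (h : List String)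
    (hs : List (List String)) (g : Int) :
    pvRender (x :: q0 :: qs) (h :: hs) g =
      x ++ (((PySem.List.pyGet? h g).getD "").toList ++ pvRender (q0 :: qs) hs g) := by
  simp [pvRender]

-- B's parse+render equals the combined single pass
theorem pvParse_render (g : Int) :
    ∀ n s cur, s.length ≤ n →
      pvRender (pvParseGo s cur).1 (pvParseGo s cur).2 g =
        cur.reverse ++ pvSubst ((PySem.List.pyGet? ["he", "she", "they"] g).getD "").toList
          ((PySem.List.pyGet? ["his", "her", "their"] g).getD "").toList
          ((PySem.List.pyGet? ["him", "her", "them"] g).getD "").toList s := by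
  intro n
  induction n with
  | zero =>
    intro s cur hs
    have : s = [] := by cases s <;> simp_all
    subst this
    rw [pvParseGo, pvSubst]
    simp [pvRender]
  | succ n ih =>
    intro s cur hs
    cases s with
    | nil =>
      rw [pvParseGo, pvSubst]
      simp [pvRender]
    | cons c t =>
      have e1 : ("$NOM_PRONOUN" : String).toList = pvTok1 := rfl
      have e2 : ("$POSS_PRONOUN" : String).toList = pvTok2 := rfl
      have e3 : ("$ACC_PRONOUN" : String).toList = pvTok3 := rfl
      by_cases h1 : pvTok1.isPrefixOf (c :: t)
      · have hfind : pvPronounsDict.find? (fun pr => pr.1.toList.isPrefixOf (c :: t)) =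
            some ("$NOM_PRONOUN", ["he", "she", "they"]) := by
          rw [pvPronounsDict]
          exact List.find?_cons_of_pos (by simpa [e1] using h1)
        rw [pvParseGo, hfind]
        dsimp only
        rw [show ("$NOM_PRONOUN" : String).toList.length - 1 = 11 from rfl]
        obtain ⟨q0, qs, hq⟩ := pvParseGo_shape (t.drop 11) []
        have hIH := ih (t.drop 11) [] (by simp at hs ⊢; omega)
        rw [hq] at hIH ⊢
        rw [pvRender_cons, hIH, pvSubst, if_pos h1]
        simp
      · by_cases h2 : pvTok2.isPrefixOf (c :: t)
        · have hfind : pvPronounsDict.find? (fun pr => pr.1.toList.isPrefixOf (c :: t)) =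
              some ("$POSS_PRONOUN", ["his", "her", "their"]) := by
            rw [pvPronounsDict, List.find?_cons_of_neg (by simpa [e1] using h1)]
            exact List.find?_cons_of_pos (by simpa [e2] using h2)
          rw [pvParseGo, hfind]
          dsimp only
          rw [show ("$POSS_PRONOUN" : String).toList.length - 1 = 12 from rfl]
          obtain ⟨q0, qs, hq⟩ := pvParseGo_shape (t.drop 12) []
          have hIH := ih (t.drop 12) [] (by simp at hs ⊢; omega)
          rw [hq] at hIH ⊢
          rw [pvRender_cons, hIH, pvSubst, if_neg (by simpa using h1), if_pos h2]
          simp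
        · by_cases h3 : pvTok3.isPrefixOf (c :: t)
          · have hfind : pvPronounsDict.find? (fun pr => pr.1.toList.isPrefixOf (c :: t)) =
                some ("$ACC_PRONOUN", ["him", "her", "them"]) := by
              rw [pvPronounsDict, List.find?_cons_of_neg (by simpa [e1] using h1),
                  List.find?_cons_of_neg (by simpa [e2] using h2)]
              exact List.find?_cons_of_pos (by simpa [e3] using h3)
            rw [pvParseGo, hfind]
            dsimp only
            rw [show ("$ACC_PRONOUN" : String).toList.length - 1 = 11 from rfl]
            obtain ⟨q0, qs, hq⟩ := pvParseGo_shape (t.drop 11) []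
            have hIH := ih (t.drop 11) [] (by simp at hs ⊢; omega)
            rw [hq] at hIH ⊢
            rw [pvRender_cons, hIH, pvSubst, if_neg (by simpa using h1),
                if_neg (by simpa using h2), if_pos h3]
            simp
          · have hfind : pvPronounsDict.find? (fun pr => pr.1.toList.isPrefixOf (c :: t)) =
                none := by
              rw [pvPronounsDict, List.find?_cons_of_neg (by simpa [e1] using h1),
                  List.find?_cons_of_neg (by simpa [e2] using h2),
                  List.find?_cons_of_neg (by simpa [e3] using h3)]
              rfl
            rw [pvParseGo, hfind]
            dsimp only
            have hIH := ih t (c :: cur) (by simp at hs ⊢; omega)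
            rw [hIH, pvSubst, if_neg (by simpa using h1), if_neg (by simpa using h2),
                if_neg (by simpa using h3)]
            simp

-- pronoun lookups for an in-range gender index are nonempty all-lowercase words
theorem pvPron_of_all (p : List Char) (h1 : p ≠ []) (h2 : p.all Char.isLower = true) :
    pvIsPron p := ⟨h1, by simpa using h2⟩

theorem pvPronCond (g : Int) (hg1 : -3 ≤ g) (hg2 : g < 3) :
    pvIsPron ((PySem.List.pyGet? ["he", "she", "they"] g).getD "").toList ∧
    pvIsPron ((PySem.List.pyGet? ["his", "her", "their"] g).getD "").toList ∧
    pvIsPron ((PySem.List.pyGet? ["him", "her", "them"] g).getD "").toList := by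
  interval_cases g <;>
    exact ⟨pvPron_of_all _ (by decide) rfl, pvPron_of_all _ (by decide) rfl,
      pvPron_of_all _ (by decide) rfl⟩

-- one template, one gender: A's replace chain = B's parse-and-render
theorem pvInner_eq (g : Int) (hg1 : -3 ≤ g) (hg2 : g < 3) (tmpl : String) :
    pvPronounsDict.foldl (fun gend_sentence pr =>
      PySem.Str.replace gend_sentence pr.1 ((PySem.List.pyGet? pr.2 g).getD "")) tmpl =
    String.ofList (pvRender (pvParseGo tmpl.toList []).1 (pvParseGo tmpl.toList []).2 g) := by
  obtain ⟨hc1, hc2, hc3⟩ := pvPronCond g hg1 hg2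
  apply String.toList_inj.mp
  rw [String.toList_ofList]
  rw [pvParse_render g tmpl.toList.length tmpl.toList [] le_rfl]
  simp only [pvPronounsDict, List.foldl_cons, List.foldl_nil]
  rw [PySem.Str.toList_replace, PySem.Str.toList_replace, PySem.Str.toList_replace]
  rw [show ("$NOM_PRONOUN" : String).toList = pvTok1 from rfl,
      show ("$POSS_PRONOUN" : String).toList = pvTok2 from rfl,
      show ("$ACC_PRONOUN" : String).toList = pvTok3 from rfl]
  rw [pvReplace_eq _ _ _ (by decide), pvReplace_eq _ _ _ (by decide),
      pvReplace_eq _ _ _ (by decide)]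
  rw [pvComp _ _ _ hc1 hc2 hc3 tmpl.toList]
  simp

-- ===== VERDICT (by name: the statement is the Claim_ definition above) =====
theorem instantiate_gender_spec : Claim_equal_instantiate_gender := by
  intro templates genders hdom hpre
  unfold Spec_instantiate_gender instantiate_gender instantiate_gender_alt
  rcases hpre with hT | hG
  · subst hT; rfl
  · rw [PySem.List.foldl_append_singleton_eq_map]
    simp only [List.nil_append]
    apply List.map_congr_left
    intro tmpl _
    rw [PySem.List.foldl_append_singleton_eq_map]
    simp only [List.nil_append]
    apply List.map_congr_left
    intro g hgmem
    obtain ⟨hg1, hg2⟩ := hG g hgmem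
    exact pvInner_eq g hg1 hg2 tmpl
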